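-- pv_equiv track=rewrite | github.com/ajit-000/VSCode | python/reducearraytohalf.py | redarr
-- ===== SOURCE A (Python) =====
-- from collections import Counter
--
-- def redarr(arr):
--     cnt = 0
--     x = Counter(arr)
--     hs = len(arr)//2
--     freq = [i for i in x.values()]
--     freq.sort(reverse=True)
--     while hs > 0:
--         hs -= freq[cnt]
--         cnt += 1
--     return cnt
-- ===== SOURCE B (Python) =====
-- def redarr(arr):
--     x = {}
--     for a in arr:
--         x[a] = x.get(a, 0) + 1
--     buckets = {}
--     for f in x.values():
--         buckets[f] = buckets.get(f, 0) + 1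
--     hs = len(arr) // 2
--     cnt = 0
--     for f in range(len(arr), 0, -1):
--         b = buckets.get(f, 0)
--         while b > 0 and hs > 0:
--             hs -= f
--             cnt += 1
--             b -= 1
--     return cnt
-- ===== Notes on version B (the rewrite author's own statement) =====
-- stated objective: alternative
-- what changed: Replaces the comparison sort of the frequency list plus an indexed while-loop by a counting-sort style scan: a frequency-of-frequencies dict is built and frequencies are consumed by iterating f from len(arr) down to 1, draining buckets[f] copies of f while the target is positive.
import Mathlib
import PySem

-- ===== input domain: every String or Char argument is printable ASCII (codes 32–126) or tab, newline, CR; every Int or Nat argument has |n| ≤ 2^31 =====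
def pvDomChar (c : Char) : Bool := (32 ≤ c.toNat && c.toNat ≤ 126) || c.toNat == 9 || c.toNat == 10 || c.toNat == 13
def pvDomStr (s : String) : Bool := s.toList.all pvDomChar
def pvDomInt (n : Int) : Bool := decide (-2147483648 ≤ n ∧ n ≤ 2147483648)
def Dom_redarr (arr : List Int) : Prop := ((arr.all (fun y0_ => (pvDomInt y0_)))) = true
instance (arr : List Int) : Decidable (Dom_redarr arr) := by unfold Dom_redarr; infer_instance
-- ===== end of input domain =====

-- B replaces A's comparison sort of the frequency list + indexed while-loop by a
-- frequency-of-frequencies dict drained by a descending scan f = len(arr) .. 1 (objective: alternative).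

-- ===== PORT A =====
-- 'while hs > 0: hs -= freq[cnt]; cnt += 1' — freq[cnt] walks the sorted list front to back.
-- The [] branch is Python's IndexError position; it is unreachable (the frequencies sum to
-- len(arr) ≥ len(arr)//2), so A is total and no Pre_ is stated.
def redarrLoop : List Int → Int → Int → Int
  | [], _, cnt => cnt
  | f :: rest, hs, cnt => if 0 < hs then redarrLoop rest (hs - f) (cnt + 1) else cnt

def redarr (arr : List Int) : Int :=
  let x := PySem.Dict.counter arr
  let hs := PySem.Int.floordiv (arr.length : Int) 2
  let freq := PySem.List.sorted x.values (fun v => v) true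
  redarrLoop freq hs 0

-- ===== PORT B =====
-- 'while b > 0 and hs > 0: hs -= f; cnt += 1; b -= 1'
def altInner (f b hs cnt : Int) : Int × Int :=
  if 0 < b ∧ 0 < hs then altInner f (b - 1) (hs - f) (cnt + 1) else (hs, cnt)
termination_by b.toNat
decreasing_by omega

def redarr_alt (arr : List Int) : Int :=
  let x := arr.foldl (fun d a => d.insert a (d.getD a 0 + 1)) (PySem.Dict.empty : PySem.Dict Int Int)
  let buckets := x.values.foldl (fun d f => d.insert f (d.getD f 0 + 1)) (PySem.Dict.empty : PySem.Dict Int Int)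
  let hs := PySem.Int.floordiv (arr.length : Int) 2
  let r := (PySem.List.pyRange (arr.length : Int) 0 (-1)).foldl
      (fun (s : Int × Int) f => altInner f (buckets.getD f 0) s.1 s.2) (hs, 0)
  r.2

-- ===== PRECONDITION & SPEC =====
def Spec_redarr (arr : List Int) (out : Int) : Prop := out = redarr_alt arr
instance (arr : List Int) (out : Int) : Decidable (Spec_redarr arr out) := by unfold Spec_redarr; infer_instance

-- ===== CLAIM (what is proved, stated in full; the proofs are below) =====
def Claim_equal_redarr : Prop := ∀ (arr : List Int), Dom_redarr arr → Spec_redarr arr (redarr arr)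

-- ===== LEMMAS AND PROOFS =====

-- Both loops are the same greedy consumption of a list of frequencies.
def greedy : List Int → Int → Int → Int × Int
  | [], hs, cnt => (hs, cnt)
  | f :: rest, hs, cnt => if 0 < hs then greedy rest (hs - f) (cnt + 1) else (hs, cnt)

theorem greedy_stop (l : List Int) (hs cnt : Int) (h : ¬ 0 < hs) : greedy l hs cnt = (hs, cnt) := by
  cases l <;> simp [greedy, h]

theorem redarrLoop_eq_greedy (fs : List Int) : ∀ hs cnt : Int,
    redarrLoop fs hs cnt = (greedy fs hs cnt).2 := by
  induction fs with
  | nil => intro hs cnt; simp [redarrLoop, greedy]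
  | cons f rest ih =>
      intro hs cnt
      by_cases h : 0 < hs <;> simp [redarrLoop, greedy, h, ih]

theorem altInner_eq_greedy : ∀ (n : Nat) (f b hs cnt : Int), b.toNat = n →
    altInner f b hs cnt = greedy (List.replicate n f) hs cnt := by
  intro n
  induction n with
  | zero =>
      intro f b hs cnt hb
      rw [altInner]
      have : ¬ (0 < b ∧ 0 < hs) := by omega
      simp [this, greedy]
  | succ n ih =>
      intro f b hs cnt hb
      have hbpos : 0 < b := by omega
      rw [altInner, List.replicate_succ]
      by_cases h : 0 < hs
      · simp only [hbpos, h, and_self, if_true, greedy]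
        exact ih f (b - 1) (hs - f) (cnt + 1) (by omega)
      · simp [h, greedy]

theorem greedy_append (l1 l2 : List Int) : ∀ hs cnt : Int,
    greedy (l1 ++ l2) hs cnt = greedy l2 (greedy l1 hs cnt).1 (greedy l1 hs cnt).2 := by
  induction l1 with
  | nil => intro hs cnt; simp [greedy]
  | cons f rest ih =>
      intro hs cnt
      by_cases h : 0 < hs
      · simp [greedy, h, ih]
      · simp [greedy, h, greedy_stop _ _ _ h]

-- B's outer fold over the descending range is the greedy loop over the concatenated replicates.
theorem foldl_altInner_eq_greedy (g : Int → Int) (fs : List Int) : ∀ hs cnt : Int,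
    fs.foldl (fun (s : Int × Int) f => altInner f (g f) s.1 s.2) (hs, cnt)
      = greedy (fs.flatMap (fun f => List.replicate (g f).toNat f)) hs cnt := by
  induction fs with
  | nil => intro hs cnt; simp [greedy]
  | cons f rest ih =>
      intro hs cnt
      rw [List.flatMap_cons, greedy_append, ← altInner_eq_greedy (g f).toNat f (g f) hs cnt rfl]
      simp only [List.foldl_cons]
      rw [ih (altInner f (g f) hs cnt).1 (altInner f (g f) hs cnt).2]

theorem count_flatMap_replicate (v : List Int) : ∀ (fs : List Int), fs.Nodup → ∀ a : Int,
    (fs.flatMap (fun f => List.replicate (v.count f) f)).count a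
      = if a ∈ fs then v.count a else 0 := by
  intro fs
  induction fs with
  | nil => intro _ a; simp
  | cons f rest ih =>
      intro hnd a
      rw [List.flatMap_cons, List.count_append, ih hnd.of_cons a, List.count_replicate]
      by_cases hfa : a = f
      · subst hfa
        have : a ∉ rest := (List.nodup_cons.mp hnd).1
        simp [this]
      · simp [hfa, Ne.symm hfa]

theorem perm_flatMap_replicate (v : List Int) (n : Int) (hv : ∀ x ∈ v, 0 < x ∧ x ≤ n) :
    ((PySem.List.pyRange n 0 (-1)).flatMap (fun f => List.replicate (v.count f) f)).Perm v := by
  have hnd : (PySem.List.pyRange n 0 (-1)).Nodup := by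
    rw [PySem.List.pyRange_neg_one_eq_reverse]
    exact List.nodup_reverse.mpr (PySem.List.nodup_pyRange_one _ _)
  rw [List.perm_iff_count]
  intro a
  rw [count_flatMap_replicate v _ hnd a]
  by_cases hm : a ∈ PySem.List.pyRange n 0 (-1)
  · simp [hm]
  · have : a ∉ v := by
      intro hav
      exact hm (by rw [PySem.List.mem_pyRange_neg_one]; exact ⟨(hv a hav).1, (hv a hav).2⟩)
    simp [hm, List.count_eq_zero.mpr this]

theorem pairwise_flatMap_replicate (c : Int → Nat) (fs : List Int)
    (h : fs.Pairwise (fun a b => b < a)) :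
    (fs.flatMap (fun f => List.replicate (c f) f)).Pairwise (fun a b => b ≤ a) := by
  rw [List.pairwise_flatMap]
  constructor
  · intro a _
    exact List.pairwise_replicate_of_refl
  · refine h.imp_of_mem ?_
    intro a b _ _ hab x hx y hy
    rw [List.eq_of_mem_replicate hx, List.eq_of_mem_replicate hy]
    exact le_of_lt hab

-- The descending bucket enumeration IS sorted(v, reverse=True).
theorem desc_eq_sorted (v : List Int) (n : Int) (hv : ∀ x ∈ v, 0 < x ∧ x ≤ n) :
    PySem.List.sorted v (fun y => y) true
      = (PySem.List.pyRange n 0 (-1)).flatMap (fun f => List.replicate (v.count f) f) := by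
  have hperm : (PySem.List.sorted v (fun y => y) true).Perm
      ((PySem.List.pyRange n 0 (-1)).flatMap (fun f => List.replicate (v.count f) f)) :=
    (PySem.List.sorted_perm v _ _).trans (perm_flatMap_replicate v n hv).symm
  have hdesc : (PySem.List.pyRange n 0 (-1)).Pairwise (fun a b => b < a) := by
    rw [PySem.List.pyRange_neg_one_eq_reverse]
    exact (List.pairwise_reverse).mpr (PySem.List.pairwise_lt_pyRange_one _ _)
  exact hperm.eq_of_pairwise (fun a b _ _ h1 h2 => le_antisymm h2 h1)
    (PySem.List.sorted_pairwise_rev v _)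
    (pairwise_flatMap_replicate _ _ hdesc)

theorem counter_values_mem (arr : List Int) (x : Int)
    (hx : x ∈ (PySem.Dict.counter arr).values) : 0 < x ∧ x ≤ (arr.length : Int) := by
  have hv : (PySem.Dict.counter arr).values
      = (PySem.Set.ofList arr).map (fun k => (arr.count k : Int)) := by
    have := PySem.Dict.items_counter arr
    simp [PySem.Dict.values, this]
  rw [hv, List.mem_map] at hx
  obtain ⟨k, hk, hkx⟩ := hx
  have hkarr : k ∈ arr := (PySem.Set.mem_ofList arr k).mp hk
  have h1 : 0 < arr.count k := List.count_pos_iff.mpr hkarr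
  have h2 : arr.count k ≤ arr.length := List.count_le_length
  omega

-- ===== VERDICT (by name: the statement is the Claim_ definition above) =====
theorem redarr_spec : Claim_equal_redarr := by
  intro arr _
  unfold Spec_redarr redarr redarr_alt
  simp only [PySem.Dict.foldl_insert_getD_add_one_eq_counter, redarrLoop_eq_greedy,
    foldl_altInner_eq_greedy, PySem.Dict.getD_counter, Int.toNat_natCast]
  rw [desc_eq_sorted ((PySem.Dict.counter arr).values) (arr.length : Int)
        (fun x hx => counter_values_mem arr x hx)]
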